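-- pv_equiv track=rewrite | github.com/CallumHewitt/adventofcode | 2020/3/solution.py | solve_1_wrong
-- ===== SOURCE A (Python) =====
-- RIGHT_STEPS = 3
--
-- DOWN_STEPS = 1
--
-- def solve_1_wrong(data):
--     WIDTH = len(data[0])
--     current_x = 0
--     current_y = 0
--     trees_hit = 0
--     while(current_y < len(data)):
--         x_trees = data[current_y][current_x + 1: current_x + 1 + RIGHT_STEPS]
--         current_x = (current_x + RIGHT_STEPS) % WIDTH
--         y_trees = []
--         if (current_y != len(data) - 1):
--             y_trees = list(map(lambda i: data[i][current_x], range(current_y + 1, current_y + 1 + DOWN_STEPS)))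
--         current_y = current_y + DOWN_STEPS
--         def hit_tree_predicate(x): return 1 if x == '#' else 0
--         trees_hit += sum(map(hit_tree_predicate, x_trees)) + sum(map(hit_tree_predicate, y_trees))
--     return trees_hit
-- ===== SOURCE B (Python) =====
-- RIGHT_STEPS = 3
--
-- DOWN_STEPS = 1
--
-- def solve_1_wrong(data):
--     WIDTH = len(data[0])
--     n = len(data)
--     total = 0
--     for y in range(n):
--         a = (RIGHT_STEPS * y) % WIDTH
--         total += data[y][a + 1: a + 4].count('#')
--     for y in range(1, n):
--         total += 1 if data[y][(RIGHT_STEPS * y) % WIDTH] == '#' else 0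
--     return total
-- ===== Notes on version B (the rewrite author's own statement) =====
-- stated objective: simpler
-- what changed: Replaced the while-loop state machine (current_x/current_y carried across iterations) by the closed-form column (3*y) % WIDTH and two independent passes: one summing the slice counts per row, one adding the diagonal cell of each row below the first.
import Mathlib
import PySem

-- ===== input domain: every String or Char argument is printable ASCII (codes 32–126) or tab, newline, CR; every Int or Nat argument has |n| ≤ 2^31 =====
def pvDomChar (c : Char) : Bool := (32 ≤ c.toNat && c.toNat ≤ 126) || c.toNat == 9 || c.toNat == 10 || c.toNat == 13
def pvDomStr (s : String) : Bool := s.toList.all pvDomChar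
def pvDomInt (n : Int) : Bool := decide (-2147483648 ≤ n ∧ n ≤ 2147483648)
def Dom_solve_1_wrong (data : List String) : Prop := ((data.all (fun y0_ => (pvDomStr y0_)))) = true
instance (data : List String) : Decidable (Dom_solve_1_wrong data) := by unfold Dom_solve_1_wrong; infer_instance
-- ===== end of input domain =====

-- B replaces A's while-loop state machine by a closed-form column (3*y) % WIDTH and two
-- independent passes (slice counts, then diagonal cells); objective: simpler decomposition.

-- ===== PORT A =====
-- hit_tree_predicate(x)
def hitTree (c : Char) : Int := if c = '#' then 1 else 0

-- the while-loop; fuel counts the remaining iterations (the loop runs exactly len(data)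
-- times: y goes 0,1,…,len-1), y/x/trees are Python's current_y/current_x/trees_hit.
def solve_1_wrong_loop (data : List String) (W : Int) :
    Nat → Int → Int → Int → Int
  | 0, _, _, trees => trees
  | fuel + 1, y, x, trees =>
    -- x_trees = data[current_y][current_x + 1 : current_x + 1 + 3]  (slice, never raises)
    let x_trees :=
      PySem.List.slice (PySem.List.pyGetD data y "").toList (some (x + 1)) (some (x + 1 + 3))
    -- current_x = (current_x + 3) % WIDTH   (Python %; raises on WIDTH = 0, outside Pre_)
    let x' := PySem.Int.mod (x + 3) W
    -- y_trees = list(map(lambda i: data[i][current_x], range(current_y+1, current_y+2)))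
    -- data[i][current_x] raises IndexError on a too-short row: total form pyGetD, Pre_ excludes
    let y_trees : List Char :=
      if y ≠ (data.length : Int) - 1 then
        (PySem.List.pyRange (y + 1) (y + 1 + 1) 1).map
          (fun i => PySem.List.pyGetD (PySem.List.pyGetD data i "").toList x' ' ')
      else []
    solve_1_wrong_loop data W fuel (y + 1) x'
      (trees + (x_trees.map hitTree).sum + (y_trees.map hitTree).sum)

def solve_1_wrong (data : List String) : Int :=
  -- WIDTH = len(data[0])  (data[0] raises IndexError on empty data, outside Pre_)
  let W := PySem.Str.len (PySem.List.pyGetD data 0 "")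
  solve_1_wrong_loop data W data.length 0 0 0

-- ===== PORT B =====
def solve_1_wrong_alt (data : List String) : Int :=
  let W := PySem.Str.len (PySem.List.pyGetD data 0 "")
  let n : Int := data.length
  -- first pass: slice counts; str.count('#') of a one-char needle = char count of the slice
  let t1 := (PySem.List.pyRange 0 n 1).foldl
    (fun acc y =>
      let a := PySem.Int.mod (3 * y) W
      acc + ((PySem.List.slice (PySem.List.pyGetD data y "").toList
                (some (a + 1)) (some (a + 4))).count '#' : Int)) 0
  -- second pass: the diagonal cell of each row below the first
  (PySem.List.pyRange 1 n 1).foldl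
    (fun acc y =>
      acc + (if PySem.List.pyGetD (PySem.List.pyGetD data y "").toList
                  (PySem.Int.mod (3 * y) W) ' ' = '#' then 1 else 0)) t1

-- ===== PRECONDITION & SPEC =====
-- width of the first row (0 when data = [])
def pvW (data : List String) : Int := ((data.getD 0 "").toList.length : Int)

-- exactly the inputs where A returns: data nonempty, first row nonempty (else IndexError /
-- ZeroDivisionError), and every row below the first long enough for its diagonal index
-- (else IndexError on data[i][current_x]).
def Pre_solve_1_wrong (data : List String) : Prop :=
  data ≠ [] ∧ (data.getD 0 "").toList ≠ [] ∧
  ∀ y ∈ List.range data.length, y ≠ 0 →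
    PySem.Int.mod (3 * (y : Int)) (pvW data) < ((data.getD y "").toList.length : Int)

instance (data : List String) : Decidable (Pre_solve_1_wrong data) := by
  unfold Pre_solve_1_wrong; infer_instance

def pvWitness_solve_1_wrong : List String := ["..#", "#.."]

def Spec_solve_1_wrong (data : List String) (out : Int) : Prop := out = solve_1_wrong_alt data
instance (data : List String) (out : Int) : Decidable (Spec_solve_1_wrong data out) := by
  unfold Spec_solve_1_wrong; infer_instance

-- ===== CLAIM (what is proved, stated in full; the proofs are below) =====
def Claim_equal_solve_1_wrong : Prop :=
  ∀ (data : List String), Dom_solve_1_wrong data → Pre_solve_1_wrong data →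
    Spec_solve_1_wrong data (solve_1_wrong data)

-- ===== LEMMAS AND PROOFS =====

-- contribution of row y's slice (A's x_trees / B's first pass), column in closed form
def cS (data : List String) (W : Int) (y : Int) : Int :=
  ((PySem.List.slice (PySem.List.pyGetD data y "").toList
      (some (PySem.Int.mod (3 * y) W + 1)) (some (PySem.Int.mod (3 * y) W + 4))).map hitTree).sum

-- contribution of row y's diagonal cell (A's y_trees / B's second pass)
def cD (data : List String) (W : Int) (y : Int) : Int :=
  hitTree (PySem.List.pyGetD (PySem.List.pyGetD data y "").toList (PySem.Int.mod (3 * y) W) ' ')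

-- reference recursion: what rows y, y+1, …, y+fuel-1 contribute
def T (data : List String) (W : Int) : Nat → Int → Int
  | 0, _ => 0
  | fuel + 1, y =>
      cS data W y + (if y ≠ (data.length : Int) - 1 then cD data W (y + 1) else 0) +
        T data W fuel (y + 1)

lemma mod_step (W y : Int) (hW : 0 < W) :
    PySem.Int.mod (PySem.Int.mod (3 * y) W + 3) W = PySem.Int.mod (3 * (y + 1)) W := by
  simp only [PySem.Int.mod_eq_emod_of_pos hW]
  rw [Int.emod_add_emod]
  ring_nf

lemma loop_eq_T (data : List String) (W : Int) (hW : 0 < W) :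
    ∀ (fuel : Nat) (y trees : Int), y + fuel = (data.length : Int) →
      solve_1_wrong_loop data W fuel y (PySem.Int.mod (3 * y) W) trees =
        trees + T data W fuel y := by
  intro fuel
  induction fuel with
  | zero => intro y trees _; simp [solve_1_wrong_loop, T]
  | succ fuel ih =>
    intro y trees hlen
    rw [solve_1_wrong_loop]
    have hx4 : PySem.Int.mod (3 * y) W + 1 + 3 = PySem.Int.mod (3 * y) W + 4 := by ring
    rw [hx4, mod_step W y hW]
    rw [ih (y + 1) _ (by push_cast at hlen ⊢; omega)]
    have hrange : PySem.List.pyRange (y + 1) (y + 1 + 1) 1 = [y + 1] :=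
      PySem.List.pyRange_one_singleton (y + 1)
    by_cases hy : y ≠ (data.length : Int) - 1 <;>
      simp [T, cS, cD, hy, hrange] <;> ring

-- a 0/1-sum over hitTree is the '#'-count
lemma sum_hitTree (l : List Char) : (l.map hitTree).sum = (l.count '#' : Int) := by
  induction l with
  | nil => simp
  | cons c l ih =>
    by_cases h : c = '#'
    · simp [hitTree, h, ih]; omega
    · simp [hitTree, h, ih]

lemma alt_eq_sums (data : List String) :
    solve_1_wrong_alt data =
      ((PySem.List.pyRange 0 (data.length : Int) 1).map
          (fun y => cS data (pvW data) y)).sum +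
        ((PySem.List.pyRange 1 (data.length : Int) 1).map
          (fun y => cD data (pvW data) y)).sum := by
  unfold solve_1_wrong_alt
  have hW : PySem.Str.len (PySem.List.pyGetD data 0 "") = pvW data := by
    simp [pvW, PySem.List.pyGetD_zero]
  rw [hW]
  simp only []
  rw [PySem.List.foldl_add, PySem.List.foldl_add]
  simp [cS, cD, hitTree, sum_hitTree]

lemma T_eq_sums (data : List String) (W : Int) :
    ∀ (fuel : Nat) (y : Int), y + fuel = (data.length : Int) →
      T data W fuel y =
        ((PySem.List.pyRange y (data.length : Int) 1).map (fun i => cS data W i)).sum +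
          ((PySem.List.pyRange (y + 1) (data.length : Int) 1).map (fun i => cD data W i)).sum := by
  intro fuel
  induction fuel with
  | zero =>
    intro y hlen
    rw [T, PySem.List.pyRange_one_eq_nil (by omega), PySem.List.pyRange_one_eq_nil (by omega)]
    simp
  | succ fuel ih =>
    intro y hlen
    have hy : y < (data.length : Int) := by push_cast at hlen ⊢; omega
    rw [T, ih (y + 1) (by push_cast at hlen ⊢; omega),
      PySem.List.pyRange_one_cons hy]
    by_cases hlast : y ≠ (data.length : Int) - 1
    · have hy1 : y + 1 < (data.length : Int) := by omega
      rw [if_pos hlast, PySem.List.pyRange_one_cons hy1]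
      simp; ring
    · have : y + 1 = (data.length : Int) := by omega
      rw [if_neg hlast, this, PySem.List.pyRange_one_eq_nil (le_refl _)]
      simp

-- ===== VERDICT (by name: the statement is the Claim_ definition above) =====
theorem solve_1_wrong_spec : Claim_equal_solve_1_wrong := by
  intro data _ hpre
  obtain ⟨hne, hrow0, _⟩ := hpre
  have hW : PySem.Str.len (PySem.List.pyGetD data 0 "") = pvW data := by
    simp [pvW, PySem.List.pyGetD_zero]
  have hWpos : 0 < pvW data := by
    unfold pvW
    have : (data.getD 0 "").toList.length ≠ 0 := by
      simpa [List.length_eq_zero_iff] using hrow0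
    omega
  show solve_1_wrong data = solve_1_wrong_alt data
  unfold solve_1_wrong
  rw [hW]
  have h0 : (0 : Int) = PySem.Int.mod (3 * 0) (pvW data) := by
    rw [PySem.Int.mod_eq_emod_of_pos hWpos]; simp
  rw [show solve_1_wrong_loop data (pvW data) data.length 0 0 0 =
      solve_1_wrong_loop data (pvW data) data.length 0 (PySem.Int.mod (3 * 0) (pvW data)) 0
    from by rw [← h0]]
  rw [loop_eq_T data (pvW data) hWpos data.length 0 0 (by omega)]
  rw [alt_eq_sums data, T_eq_sums data (pvW data) data.length 0 (by omega)]
  simp
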